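-- pv_equiv track=rewrite | github.com/KineticFam/whitakerexclusives.com | scripts/inbox-parser.py | find_listing
-- ===== SOURCE A (Python) =====
-- def find_listing(listings, identifier):
--     """Find a listing by address (fuzzy) or MLS number."""
--     identifier = identifier.strip().lower()
--     for l in listings:
--         if l.get('mlsNumber', '').lower() == identifier:
--             return l
--         if l.get('address', '').lower() == identifier:
--             return l
--     # Fuzzy: check if identifier is contained in address
--     for l in listings:
--         if identifier in l.get('address', '').lower():
--             return l
--         if identifier in l.get('mlsNumber', '').lower():
--             return l
--     return None
-- ===== SOURCE B (Python) =====
-- def find_listing(listings, identifier):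
--     """Find a listing by address (fuzzy) or MLS number, in one pass with a fallback."""
--     identifier = identifier.strip().lower()
--     fallback = None
--     for l in listings:
--         mls = l.get('mlsNumber', '').lower()
--         addr = l.get('address', '').lower()
--         if mls == identifier or addr == identifier:
--             return l
--         if fallback is None and (identifier in addr or identifier in mls):
--             fallback = l
--     return fallback
-- ===== Notes on version B (the rewrite author's own statement) =====
-- stated objective: alternative
-- what changed: Replaced A's two full passes over the listings (exact pass, then fuzzy pass) by a single pass that returns immediately on an exact match and records the first fuzzy match in a fallback variable returned at the end.
import Mathlib
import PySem

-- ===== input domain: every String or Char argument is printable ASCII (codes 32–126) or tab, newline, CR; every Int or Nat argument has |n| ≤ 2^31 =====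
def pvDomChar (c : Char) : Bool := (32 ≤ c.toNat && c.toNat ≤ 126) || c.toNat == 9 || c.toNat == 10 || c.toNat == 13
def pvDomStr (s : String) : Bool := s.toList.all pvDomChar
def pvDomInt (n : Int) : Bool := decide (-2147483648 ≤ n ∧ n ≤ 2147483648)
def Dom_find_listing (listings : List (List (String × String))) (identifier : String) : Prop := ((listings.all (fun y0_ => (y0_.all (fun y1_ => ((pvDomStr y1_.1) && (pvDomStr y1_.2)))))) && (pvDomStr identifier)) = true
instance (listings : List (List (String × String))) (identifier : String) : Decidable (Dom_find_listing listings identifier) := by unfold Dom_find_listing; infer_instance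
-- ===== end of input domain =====

-- B replaces A's two full passes (exact, then fuzzy) by one pass carrying a fallback (alternative decomposition, same cost); equivalence of the return value is proved.

-- ===== PORT A =====
-- A's first loop: return the first listing whose mlsNumber or address equals the identifier.
def fl_exactLoop (ident : String) : List (List (String × String)) → Option (List (String × String))
  | [] => none
  | l :: rest =>
    if PySem.Str.lower ((PySem.Dict.mk l).getD "mlsNumber" "") = ident then some l
    else if PySem.Str.lower ((PySem.Dict.mk l).getD "address" "") = ident then some l
    else fl_exactLoop ident rest

-- A's second loop: return the first listing whose address or mlsNumber contains the identifier.
def fl_fuzzyLoop (ident : String) : List (List (String × String)) → Option (List (String × String))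
  | [] => none
  | l :: rest =>
    if PySem.Str.isIn ident (PySem.Str.lower ((PySem.Dict.mk l).getD "address" "")) then some l
    else if PySem.Str.isIn ident (PySem.Str.lower ((PySem.Dict.mk l).getD "mlsNumber" "")) then some l
    else fl_fuzzyLoop ident rest

def find_listing (listings : List (List (String × String))) (identifier : String) : Option (List (String × String)) :=
  let ident := PySem.Str.lower (PySem.Str.strip identifier)
  match fl_exactLoop ident listings with
  | some l => some l
  | none => fl_fuzzyLoop ident listings

-- ===== PORT B =====
-- B's single loop: return immediately on an exact match, else remember the first fuzzy match as fallback.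
def fl_altLoop (ident : String) : List (List (String × String)) → Option (List (String × String)) → Option (List (String × String))
  | [], fb => fb
  | l :: rest, fb =>
    let mls := PySem.Str.lower ((PySem.Dict.mk l).getD "mlsNumber" "")
    let addr := PySem.Str.lower ((PySem.Dict.mk l).getD "address" "")
    if mls = ident ∨ addr = ident then some l
    else fl_altLoop ident rest
      (if fb = none ∧ (PySem.Str.isIn ident addr || PySem.Str.isIn ident mls) then some l else fb)

def find_listing_alt (listings : List (List (String × String))) (identifier : String) : Option (List (String × String)) :=
  fl_altLoop (PySem.Str.lower (PySem.Str.strip identifier)) listings none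

-- ===== PRECONDITION & SPEC =====
def Spec_find_listing (listings : List (List (String × String))) (identifier : String) (out : Option (List (String × String))) : Prop := out = find_listing_alt listings identifier
instance (listings : List (List (String × String))) (identifier : String) (out : Option (List (String × String))) : Decidable (Spec_find_listing listings identifier out) := by unfold Spec_find_listing; infer_instance

-- ===== CLAIM (what is proved, stated in full; the proofs are below) =====
def Claim_equal_find_listing : Prop := ∀ (listings : List (List (String × String))) (identifier : String), Dom_find_listing listings identifier → Spec_find_listing listings identifier (find_listing listings identifier)

-- ===== LEMMAS AND PROOFS =====

-- The one-pass loop computes: first exact match, else the fallback, else the first fuzzy match.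
theorem fl_altLoop_eq (ident : String) (L : List (List (String × String)))
    (fb : Option (List (String × String))) :
    fl_altLoop ident L fb =
      ((fl_exactLoop ident L).or (fb.or (fl_fuzzyLoop ident L))) := by
  induction L generalizing fb with
  | nil => simp [fl_altLoop, fl_exactLoop, fl_fuzzyLoop]
  | cons l rest ih =>
    simp only [fl_altLoop, fl_exactLoop, fl_fuzzyLoop]
    split_ifs <;> cases fb <;> simp_all [ih, Option.or]

theorem find_listing_spec : Claim_equal_find_listing := by
  intro listings identifier _
  unfold Spec_find_listing find_listing find_listing_alt
  rw [fl_altLoop_eq]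
  cases h : fl_exactLoop (PySem.Str.lower (PySem.Str.strip identifier)) listings <;>
    simp [h, Option.or]

-- ===== VERDICT (by name: the statement is the Claim_ definition above) =====
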